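-- pv_equiv track=rewrite | github.com/RayYH/python-practice | src/algorithms/arrays/squares_of_a_sorted_array.py | distinct_count
-- ===== SOURCE A (Python) =====
-- def distinct_count(nums):
--     """
--     Return the distinct counts of squares.
--     """
--     length = len(nums)
--     if length <= 1:
--         return length
--     left, right = 0, length - 1
--     ans = 0
--     while left <= right:
--         left_abs = abs(nums[left])
--         right_abs = abs(nums[right])
--         if left_abs > right_abs:
--             ans += 1
--             while left <= right and abs(nums[left]) == left_abs:
--                 left += 1
--         elif left_abs < right_abs:
--             ans += 1
--             while left <= right and abs(nums[right]) == right_abs: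
--                 right -= 1
--         else:
--             ans += 1
--             while left <= right and abs(nums[left]) == left_abs:
--                 left += 1
--             while left <= right and abs(nums[right]) == right_abs:
--                 right -= 1
--     return ans
-- ===== SOURCE B (Python) =====
-- def distinct_count(nums):
--     """
--     Return the distinct counts of squares.
--     """
--     return len({abs(x) for x in nums})
-- ===== Notes on version B (the rewrite author's own statement) =====
-- stated objective: simpler
-- what changed: Replaces the two-pointer convergence scan over the sorted array with one-line hash-set deduplication of absolute values (len of a set comprehension), ignoring sortedness entirely.
-- outside the precondition, e.g. on distinct_count([1, 2, 1, 2]): A returns 3, B returns 2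
import Mathlib
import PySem

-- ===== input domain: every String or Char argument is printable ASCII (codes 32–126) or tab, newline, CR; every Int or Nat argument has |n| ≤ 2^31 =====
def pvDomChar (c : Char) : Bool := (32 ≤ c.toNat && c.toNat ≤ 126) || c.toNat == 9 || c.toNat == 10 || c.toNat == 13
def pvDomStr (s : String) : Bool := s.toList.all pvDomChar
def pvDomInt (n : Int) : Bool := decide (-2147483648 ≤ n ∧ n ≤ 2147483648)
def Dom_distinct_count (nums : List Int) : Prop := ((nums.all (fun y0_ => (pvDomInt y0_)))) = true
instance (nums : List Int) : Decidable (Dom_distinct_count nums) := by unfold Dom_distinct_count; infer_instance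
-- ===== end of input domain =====

-- B replaces A's two-pointer convergence scan (which relies on the array being sorted)
-- by one-line set deduplication of absolute values; objective: simpler.

-- ===== PORT A =====
-- abs(nums[i]) : inside A's loop the index always satisfies 0 ≤ i < len(nums) (left starts at 0
-- and only increases while ≤ right; right starts at len-1 and only decreases while ≥ left), so
-- the total form pyGetD with default 0 is exact here; abs is Int.natAbs cast back to Int.
def pvAbsAt (nums : List Int) (i : Int) : Int := ((PySem.List.pyGetD nums i 0).natAbs : Int)

-- small termination facts (cited by the ports' decreasing_by; kept tiny on purpose)
theorem pvDecSL (a b : Int) (h : b ≤ a) : (a + 1 - (b + 1)).toNat < (a + 1 - b).toNat := by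
  rw [Int.add_sub_add_right]
  exact (Int.toNat_lt_toNat (Int.sub_pos.mpr (Int.lt_add_one_iff.mpr h))).mpr
    (sub_lt_sub_right (lt_add_one a) b)

theorem pvDecSR (a b : Int) (h : b ≤ a) : (a - 1 + 1 - b).toNat < (a + 1 - b).toNat := by
  rw [Int.sub_add_cancel]
  exact (Int.toNat_lt_toNat (Int.sub_pos.mpr (Int.lt_add_one_iff.mpr h))).mpr
    (sub_lt_sub_right (lt_add_one a) b)

theorem pvDecL (a b c : Int) (h : b ≤ a) (hc : b + 1 ≤ c) : (a + 1 - c).toNat < (a + 1 - b).toNat :=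
  (Int.toNat_lt_toNat (Int.sub_pos.mpr (Int.lt_add_one_iff.mpr h))).mpr
    (sub_lt_sub_left (Int.lt_iff_add_one_le.mpr hc) (a + 1))

theorem pvDecR (a b c : Int) (h : b ≤ a) (hc : c ≤ a - 1) : (c + 1 - b).toNat < (a + 1 - b).toNat :=
  (Int.toNat_lt_toNat (Int.sub_pos.mpr (Int.lt_add_one_iff.mpr h))).mpr
    (sub_lt_sub_right (Int.add_lt_add_right (Int.le_sub_one_iff.mp hc) 1) b)

theorem pvDecLR (a b c d : Int) (h : b ≤ a) (hc : b + 1 ≤ c) (hd : d ≤ a) :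
    (d + 1 - c).toNat < (a + 1 - b).toNat :=
  (Int.toNat_lt_toNat (Int.sub_pos.mpr (Int.lt_add_one_iff.mpr h))).mpr
    (lt_of_le_of_lt (sub_le_sub_right (Int.add_le_add_right hd 1) c)
      (sub_lt_sub_left (Int.lt_iff_add_one_le.mpr hc) (a + 1)))

-- inner 'while left <= right and abs(nums[left]) == left_abs: left += 1'
def pvSkipL (nums : List Int) (right v : Int) (left : Int) : Int :=
  if h : left ≤ right ∧ pvAbsAt nums left = v then pvSkipL nums right v (left + 1) else left
termination_by (right + 1 - left).toNat
decreasing_by exact pvDecSL right left h.1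

-- inner 'while left <= right and abs(nums[right]) == right_abs: right -= 1'
def pvSkipR (nums : List Int) (left v : Int) (right : Int) : Int :=
  if h : left ≤ right ∧ pvAbsAt nums right = v then pvSkipR nums left v (right - 1) else right
termination_by (right + 1 - left).toNat
decreasing_by exact pvDecSR right left h.1

theorem pvSkipL_ge (nums : List Int) (right v left : Int) : left ≤ pvSkipL nums right v left := by
  fun_induction pvSkipL <;> omega

theorem pvSkipR_le (nums : List Int) (left v right : Int) : pvSkipR nums left v right ≤ right := by
  fun_induction pvSkipR <;> omega

theorem pvSkipL_succ (nums : List Int) (right left : Int) (h : left ≤ right) :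
    left + 1 ≤ pvSkipL nums right (pvAbsAt nums left) left := by
  rw [pvSkipL]
  rw [dif_pos (show left ≤ right ∧ pvAbsAt nums left = pvAbsAt nums left from ⟨h, rfl⟩)]
  exact pvSkipL_ge nums right _ (left + 1)

theorem pvSkipR_pred (nums : List Int) (left right : Int) (h : left ≤ right) :
    pvSkipR nums left (pvAbsAt nums right) right ≤ right - 1 := by
  rw [pvSkipR]
  rw [dif_pos (show left ≤ right ∧ pvAbsAt nums right = pvAbsAt nums right from ⟨h, rfl⟩)]
  have := pvSkipR_le nums left (pvAbsAt nums right) (right - 1)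
  omega

-- 'while left <= right: …' of A
def pvLoopA (nums : List Int) (left right ans : Int) : Int :=
  if h : left ≤ right then
    let left_abs := pvAbsAt nums left
    let right_abs := pvAbsAt nums right
    if left_abs > right_abs then
      pvLoopA nums (pvSkipL nums right left_abs left) right (ans + 1)
    else if left_abs < right_abs then
      pvLoopA nums left (pvSkipR nums left right_abs right) (ans + 1)
    else
      let l' := pvSkipL nums right left_abs left
      pvLoopA nums l' (pvSkipR nums l' right_abs right) (ans + 1)
  else ans
termination_by (right + 1 - left).toNat
decreasing_by
  · exact pvDecL right left _ h (pvSkipL_succ nums right left h)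
  · exact pvDecR right left _ h (pvSkipR_pred nums left right h)
  · exact pvDecLR right left _ _ h (pvSkipL_succ nums right left h)
      (pvSkipR_le nums (pvSkipL nums right (pvAbsAt nums left) left) (pvAbsAt nums right) right)

def distinct_count (nums : List Int) : Int :=
  let length : Int := nums.length
  if length ≤ 1 then length
  else pvLoopA nums 0 (length - 1) 0

-- ===== PORT B =====
def distinct_count_alt (nums : List Int) : Int :=
  ((PySem.Set.ofList (nums.map (fun x => |x|))).length : Int)

-- ===== PRECONDITION & SPEC =====
-- Pre_ excludes lists whose absolute values are NOT non-increasing-then-non-decreasing (a "valley";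
-- every sorted list — the documented input of this squares_of_a_sorted_array routine — is one):
-- outside it A's end-peeling scan can count an abs value twice and its result is an accidental
-- artefact of the scan (e.g. A returns 3 on [1, 2, 1, 2], which has only 2 distinct squares).
def Pre_distinct_count (nums : List Int) : Prop :=
  ∃ k ∈ Finset.range (nums.length + 1),
    ((nums.map Int.natAbs).take k).Pairwise (fun a b => b ≤ a) ∧
    ((nums.map Int.natAbs).drop k).Pairwise (fun a b => a ≤ b)
instance (nums : List Int) : Decidable (Pre_distinct_count nums) := by
  unfold Pre_distinct_count; infer_instance

def pvWitness_distinct_count : List Int := [-3, -1, 0, 2, 3]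

def Spec_distinct_count (nums : List Int) (out : Int) : Prop := out = distinct_count_alt nums
instance (nums : List Int) (out : Int) : Decidable (Spec_distinct_count nums out) := by
  unfold Spec_distinct_count; infer_instance

-- ===== CLAIM (what is proved, stated in full; the proofs are below) =====
def Claim_equal_distinct_count : Prop := ∀ (nums : List Int), Dom_distinct_count nums →
  Pre_distinct_count nums → Spec_distinct_count nums (distinct_count nums)

-- ===== LEMMAS AND PROOFS =====

theorem pvAbsAt_getElem (nums : List Int) (i : Int) (h0 : 0 ≤ i) (h : i.toNat < nums.length) :
    pvAbsAt nums i = ((nums[i.toNat]).natAbs : Int) := by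
  unfold pvAbsAt
  rw [PySem.List.pyGetD_of_nonneg _ _ h0, List.getD_eq_getElem _ _ h]

-- the non-increasing prefix of the valley, read through pvAbsAt
theorem pvValley_dec (nums : List Int) (k : Nat) (hk : k ≤ nums.length)
    (hp : ((nums.map Int.natAbs).take k).Pairwise (fun a b => b ≤ a)) :
    ∀ i j : Int, 0 ≤ i → i ≤ j → j < (k : Int) → pvAbsAt nums j ≤ pvAbsAt nums i := by
  intro i j h0 hij hjk
  rcases eq_or_lt_of_le hij with rfl | hlt
  · exact le_refl _
  · have hi : i.toNat < k := by omega
    have hj : j.toNat < k := by omega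
    have hlen : ((nums.map Int.natAbs).take k).length = k := by
      simp [List.length_take, List.length_map]
      omega
    have hrel := List.pairwise_iff_getElem.mp hp i.toNat j.toNat
      (by omega) (by omega) (by omega)
    simp only [List.getElem_take, List.getElem_map] at hrel
    rw [pvAbsAt_getElem nums i h0 (by omega), pvAbsAt_getElem nums j (by omega) (by omega)]
    exact_mod_cast hrel

-- the non-decreasing suffix of the valley, read through pvAbsAt
theorem pvValley_inc (nums : List Int) (k : Nat)
    (hp : ((nums.map Int.natAbs).drop k).Pairwise (fun a b => a ≤ b)) :
    ∀ i j : Int, (k : Int) ≤ i → i ≤ j → j < (nums.length : Int) →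
      pvAbsAt nums i ≤ pvAbsAt nums j := by
  intro i j hki hij hj
  rcases eq_or_lt_of_le hij with rfl | hlt
  · exact le_refl _
  · have hlen : ((nums.map Int.natAbs).drop k).length = nums.length - k := by
      simp [List.length_drop, List.length_map]
    have hrel := List.pairwise_iff_getElem.mp hp (i.toNat - k) (j.toNat - k)
      (by omega) (by omega) (by omega)
    simp only [List.getElem_drop, List.getElem_map] at hrel
    have e1 : k + (i.toNat - k) = i.toNat := by omega
    have e2 : k + (j.toNat - k) = j.toNat := by omega
    simp only [e1, e2] at hrel
    rw [pvAbsAt_getElem nums i (by omega) (by omega),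
      pvAbsAt_getElem nums j (by omega) (by omega)]
    exact_mod_cast hrel

theorem pvSkipL_spec (nums : List Int) (right v left : Int) :
    ∀ i, left ≤ i → i < pvSkipL nums right v left → pvAbsAt nums i = v := by
  fun_induction pvSkipL with
  | case1 l h ih =>
    intro i hi1 hi2
    rcases eq_or_lt_of_le hi1 with rfl | hlt
    · exact h.2
    · exact ih i (by omega) hi2
  | case2 l h =>
    intro i hi1 hi2
    omega

theorem pvSkipL_stop (nums : List Int) (right v left : Int) :
    ¬ (pvSkipL nums right v left ≤ right ∧ pvAbsAt nums (pvSkipL nums right v left) = v) := by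
  fun_induction pvSkipL with
  | case1 l h ih => exact ih
  | case2 l h => exact h

theorem pvSkipR_spec (nums : List Int) (left v right : Int) :
    ∀ i, pvSkipR nums left v right < i → i ≤ right → pvAbsAt nums i = v := by
  fun_induction pvSkipR with
  | case1 r h ih =>
    intro i hi1 hi2
    rcases eq_or_lt_of_le hi2 with rfl | hlt
    · exact h.2
    · exact ih i hi1 (by omega)
  | case2 r h =>
    intro i hi1 hi2
    omega

theorem pvSkipR_stop (nums : List Int) (left v right : Int) :
    ¬ (left ≤ pvSkipR nums left v right ∧ pvAbsAt nums (pvSkipR nums left v right) = v) := by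
  fun_induction pvSkipR with
  | case1 r h ih => exact ih
  | case2 r h => exact h

-- peeling one round: the abs-image over [l, r] is m inserted into the abs-image over [l', r']
theorem pvImage_split (nums : List Int) (l r l' r' m : Int) (hl' : l ≤ l') (hr' : r' ≤ r)
    (hm : ∃ i, l ≤ i ∧ i ≤ r ∧ pvAbsAt nums i = m)
    (hout : ∀ i, l ≤ i → i ≤ r → (i < l' ∨ r' < i) → pvAbsAt nums i = m)
    (hin : ∀ i, l' ≤ i → i ≤ r' → pvAbsAt nums i ≠ m) :
    ((Finset.Icc l r).image (pvAbsAt nums)).card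
      = 1 + ((Finset.Icc l' r').image (pvAbsAt nums)).card := by
  have hset : (Finset.Icc l r).image (pvAbsAt nums)
      = insert m ((Finset.Icc l' r').image (pvAbsAt nums)) := by
    ext y
    simp only [Finset.mem_image, Finset.mem_insert, Finset.mem_Icc]
    constructor
    · rintro ⟨i, ⟨hi1, hi2⟩, rfl⟩
      by_cases hcase : i < l' ∨ r' < i
      · exact Or.inl (hout i hi1 hi2 hcase)
      · exact Or.inr ⟨i, ⟨by omega, by omega⟩, rfl⟩
    · rintro (rfl | ⟨i, ⟨hi1, hi2⟩, rfl⟩)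
      · obtain ⟨i, h1, h2, h3⟩ := hm
        exact ⟨i, ⟨h1, h2⟩, h3⟩
      · exact ⟨i, ⟨by omega, by omega⟩, rfl⟩
  rw [hset, Finset.card_insert_of_notMem]
  · omega
  · intro hmem
    rw [Finset.mem_image] at hmem
    obtain ⟨i, hi, hi3⟩ := hmem
    rw [Finset.mem_Icc] at hi
    exact hin i hi.1 hi.2 hi3

-- main invariant: on a valley, A's loop adds the number of distinct abs values of nums[left..right]
theorem pvLoopA_eq (nums : List Int) (k : Int)
    (Hdec : ∀ i j : Int, 0 ≤ i → i ≤ j → j < k → pvAbsAt nums j ≤ pvAbsAt nums i)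
    (Hinc : ∀ i j : Int, k ≤ i → i ≤ j → j < (nums.length : Int) →
      pvAbsAt nums i ≤ pvAbsAt nums j) :
    ∀ (fuel : Nat) (left right ans : Int), (right + 1 - left).toNat ≤ fuel → 0 ≤ left →
      right < (nums.length : Int) →
      pvLoopA nums left right ans
        = ans + (((Finset.Icc left right).image (pvAbsAt nums)).card : Int) := by
  intro fuel
  induction fuel with
  | zero =>
    intro left right ans hk hl hr
    rw [pvLoopA, dif_neg (by omega)]
    rw [Finset.Icc_eq_empty (by omega)]
    simp
  | succ fuel ih =>
    intro left right ans hk hl hr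
    by_cases hlr : left ≤ right
    · rw [pvLoopA, dif_pos hlr]
      simp only [gt_iff_lt]
      by_cases h1 : pvAbsAt nums right < pvAbsAt nums left
      · rw [if_pos h1]
        have hge := pvSkipL_succ nums right left hlr
        have hIH := ih (pvSkipL nums right (pvAbsAt nums left) left) right (ans + 1)
          (by omega) (by omega) hr
        rw [hIH]
        have hsplit := pvImage_split nums left right
          (pvSkipL nums right (pvAbsAt nums left) left) right (pvAbsAt nums left)
          (pvSkipL_ge nums right _ left) le_rfl
          ⟨left, le_rfl, hlr, rfl⟩
          (by
            intro i hi1 hi2 hcase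
            rcases hcase with hcase | hcase
            · exact pvSkipL_spec nums right _ left i hi1 hcase
            · omega)
          (by
            intro i hi1 hi2 hne
            have hstop : pvAbsAt nums (pvSkipL nums right (pvAbsAt nums left) left)
                ≠ pvAbsAt nums left :=
              fun he => pvSkipL_stop nums right _ left ⟨by omega, he⟩
            by_cases hik : i < k
            · have c1 := Hdec (pvSkipL nums right (pvAbsAt nums left) left) i
                (by have := pvSkipL_ge nums right (pvAbsAt nums left) left; omega) hi1 hik
              have c2 := Hdec left (pvSkipL nums right (pvAbsAt nums left) left) hl
                (pvSkipL_ge nums right _ left) (by omega)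
              omega
            · have c3 := Hinc i right (by omega) hi2 hr
              omega)
        rw [hsplit]
        push_cast
        ring
      · rw [if_neg h1]
        by_cases h2 : pvAbsAt nums left < pvAbsAt nums right
        · rw [if_pos h2]
          have hle := pvSkipR_pred nums left right hlr
          have hr' := pvSkipR_le nums left (pvAbsAt nums right) right
          have hIH := ih left (pvSkipR nums left (pvAbsAt nums right) right) (ans + 1)
            (by omega) hl (by omega)
          rw [hIH]
          have hsplit := pvImage_split nums left right
            left (pvSkipR nums left (pvAbsAt nums right) right) (pvAbsAt nums right)
            le_rfl hr'
            ⟨right, hlr, le_rfl, rfl⟩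
            (by
              intro i hi1 hi2 hcase
              rcases hcase with hcase | hcase
              · omega
              · exact pvSkipR_spec nums left _ right i hcase hi2)
            (by
              intro i hi1 hi2 hne
              have hstop : pvAbsAt nums (pvSkipR nums left (pvAbsAt nums right) right)
                  ≠ pvAbsAt nums right :=
                fun he => pvSkipR_stop nums left _ right ⟨by omega, he⟩
              by_cases hik : i < k
              · have c1 := Hdec left i hl hi1 hik
                omega
              · have c2 := Hinc i (pvSkipR nums left (pvAbsAt nums right) right)
                  (by omega) hi2 (by omega)
                have c3 := Hinc (pvSkipR nums left (pvAbsAt nums right) right) right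
                  (by omega) hr' hr
                omega)
          rw [hsplit]
          push_cast
          ring
        · rw [if_neg h2]
          have heq : pvAbsAt nums left = pvAbsAt nums right := by omega
          have hge := pvSkipL_succ nums right left hlr
          have hr'le := pvSkipR_le nums (pvSkipL nums right (pvAbsAt nums left) left)
            (pvAbsAt nums right) right
          have hIH := ih (pvSkipL nums right (pvAbsAt nums left) left)
            (pvSkipR nums (pvSkipL nums right (pvAbsAt nums left) left)
              (pvAbsAt nums right) right) (ans + 1)
            (by omega) (by omega) (by omega)
          rw [hIH]
          have hsplit := pvImage_split nums left right
            (pvSkipL nums right (pvAbsAt nums left) left)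
            (pvSkipR nums (pvSkipL nums right (pvAbsAt nums left) left)
              (pvAbsAt nums right) right)
            (pvAbsAt nums left)
            (pvSkipL_ge nums right _ left) hr'le
            ⟨left, le_rfl, hlr, rfl⟩
            (by
              intro i hi1 hi2 hcase
              rcases hcase with hcase | hcase
              · exact pvSkipL_spec nums right _ left i hi1 hcase
              · rw [heq]
                exact pvSkipR_spec nums (pvSkipL nums right (pvAbsAt nums left) left)
                  _ right i hcase hi2)
            (by
              intro i hi1 hi2 hne
              have hstopL : pvAbsAt nums (pvSkipL nums right (pvAbsAt nums left) left)
                  ≠ pvAbsAt nums left :=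
                fun he => pvSkipL_stop nums right _ left ⟨by omega, he⟩
              have hstopR : pvAbsAt nums (pvSkipR nums
                  (pvSkipL nums right (pvAbsAt nums left) left) (pvAbsAt nums right) right)
                  ≠ pvAbsAt nums right :=
                fun he => pvSkipR_stop nums (pvSkipL nums right (pvAbsAt nums left) left)
                  _ right ⟨by omega, he⟩
              by_cases hik : i < k
              · have c1 := Hdec (pvSkipL nums right (pvAbsAt nums left) left) i
                  (by have := pvSkipL_ge nums right (pvAbsAt nums left) left; omega) hi1 hik
                have c2 := Hdec left (pvSkipL nums right (pvAbsAt nums left) left) hl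
                  (pvSkipL_ge nums right _ left) (by omega)
                omega
              · have c3 := Hinc i (pvSkipR nums (pvSkipL nums right (pvAbsAt nums left) left)
                    (pvAbsAt nums right) right) (by omega) hi2 (by omega)
                have c4 := Hinc (pvSkipR nums (pvSkipL nums right (pvAbsAt nums left) left)
                    (pvAbsAt nums right) right) right (by omega) hr'le hr
                omega)
          rw [hsplit]
          push_cast
          ring
    · rw [pvLoopA, dif_neg hlr]
      rw [Finset.Icc_eq_empty (by omega)]
      simp

theorem pvAlt_eq_card (nums : List Int) :
    distinct_count_alt nums = (((nums.map (fun x => |x|)).toFinset.card : Nat) : Int) := by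
  unfold distinct_count_alt
  have hn := PySem.Set.nodup_ofList (nums.map (fun x => |x|))
  have hset : (PySem.Set.ofList (nums.map (fun x => |x|))).toFinset
      = (nums.map (fun x => |x|)).toFinset := by
    ext y
    simp [PySem.Set.mem_ofList]
  rw [← List.toFinset_card_of_nodup hn, hset]

theorem pvToFinset_eq_image (nums : List Int) :
    (nums.map (fun x => |x|)).toFinset
      = (Finset.Icc (0 : Int) ((nums.length : Int) - 1)).image (pvAbsAt nums) := by
  ext y
  simp only [List.mem_toFinset, List.mem_map, Finset.mem_image, Finset.mem_Icc]
  constructor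
  · rintro ⟨x, hx, rfl⟩
    obtain ⟨j, hj, rfl⟩ := List.mem_iff_getElem.mp hx
    refine ⟨(j : Int), ⟨by omega, by omega⟩, ?_⟩
    rw [pvAbsAt_getElem nums (j : Int) (by omega) (by simpa using hj), Int.abs_eq_natAbs]
    simp
  · rintro ⟨i, ⟨hi0, hi1⟩, rfl⟩
    have hk : i.toNat < nums.length := by omega
    refine ⟨nums[i.toNat], List.getElem_mem _, ?_⟩
    rw [pvAbsAt_getElem nums i hi0 hk, Int.abs_eq_natAbs]

-- ===== VERDICT (by name: the statement is the Claim_ definition above) =====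
theorem distinct_count_spec : Claim_equal_distinct_count := by
  intro nums _ hpre
  unfold Spec_distinct_count distinct_count
  by_cases hlen : (nums.length : Int) ≤ 1
  · rcases nums with _ | ⟨a, _ | ⟨b, t⟩⟩
    · rfl
    · rfl
    · exfalso
      simp only [List.length_cons] at hlen
      omega
  · obtain ⟨k, hkmem, hdec, hinc⟩ := hpre
    rw [Finset.mem_range] at hkmem
    dsimp only
    rw [if_neg hlen, pvAlt_eq_card, pvToFinset_eq_image]
    rw [pvLoopA_eq nums (k : Int)
      (pvValley_dec nums k (by omega) hdec)
      (pvValley_inc nums k hinc)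
      ((nums.length : Int) - 1 + 1 - 0).toNat 0 ((nums.length : Int) - 1)
      0 le_rfl le_rfl (by omega)]
    ring
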